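-- pv_equiv track=rewrite | github.com/sukinoaria/HSLM | basic/utils.py | build_triple_pair
-- ===== SOURCE A (Python) =====
-- def get_entity_boundary(preds):
--     # get cur instance aspect entity list
--     entityList = []
--     for idy in range(len(preds)):
--         if preds[idy] == 1:
--             if idy == len(preds) - 1:
--                 entityList.append([idy, idy + 1])
--             else:
--                 for k in range(idy + 1, len(preds)):
--                     if preds[k] != preds[idy] + 1:
--                         entityList.append([idy, k])
--                         break
--                     elif preds[k] == preds[idy] + 1 and k == len(preds) - 1:
--                         entityList.append([idy, k + 1])
--                         break
--     return entityList
--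
-- def build_triple_pair(aspect_results,opinion_results,polar_results):
--     total_result = []
--     asp_result = []
--     opi_result = []
--     asp_opi_result = []
--     asp_pol_result = []
--
--     for idx in range(len(aspect_results)):
--         cur_instance_result = []
--         cur_instance_asp_pol_result = []
--         cur_instance_asp_opi_result = []
--
--         entity_list = get_entity_boundary(aspect_results[idx])
--         asp_result.append(entity_list)
--
--         # use aspect entity list to find mapped opinion entity results
--         for asp_start,asp_end in entity_list:
--             # aspect polarity result construct
--             polar = polar_results[idx][asp_start]
--             if polar != 0:
--                 cur_instance_asp_pol_result.append([asp_start, asp_end, polar])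
--
--             opi_list = get_entity_boundary(opinion_results[idx][asp_start])
--             for opi_start,opi_end in opi_list:
--                 cur_instance_asp_opi_result.append([opi_start, opi_end, asp_start, asp_end])
--                 if polar !=0:
--                     cur_instance_result.append([opi_start, opi_end, asp_start,asp_end, polar])
--
--         total_result.append(cur_instance_result)
--         asp_pol_result.append(cur_instance_asp_pol_result)
--         asp_opi_result.append(cur_instance_asp_opi_result)
--         # 单独的opinion结果提取
--         cur_instance_opi_result = []
--         for idy in range(len(aspect_results[idx])):
--             opi_res = get_entity_boundary(opinion_results[idx][idy])
--             cur_instance_opi_result += opi_res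
--         opi_result.append(cur_instance_opi_result)
--
--     return total_result,asp_result,opi_result,asp_pol_result,asp_opi_result
-- ===== SOURCE B (Python) =====
-- def _spans(preds):
--     # backward DP: nxt[i] = first index j >= i with preds[j] != 2 (or n)
--     n = len(preds)
--     nxt = [n] * (n + 1)
--     for i in range(n - 1, -1, -1):
--         nxt[i] = nxt[i + 1] if preds[i] == 2 else i
--     return [[i, nxt[i + 1]] for i in range(n) if preds[i] == 1]
--
-- def build_triple_pair(aspect_results, opinion_results, polar_results):
--     n = len(aspect_results)
--     asp_result = [_spans(row) for row in aspect_results]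
--     asp_pol_result = [
--         [[s, e, polar_results[i][s]] for s, e in asp_result[i]
--          if polar_results[i][s] != 0]
--         for i in range(n)]
--     asp_opi_result = [
--         [[os, oe, s, e] for s, e in asp_result[i]
--          for os, oe in _spans(opinion_results[i][s])]
--         for i in range(n)]
--     total_result = [
--         [[os, oe, s, e, polar_results[i][s]] for s, e in asp_result[i]
--          if polar_results[i][s] != 0
--          for os, oe in _spans(opinion_results[i][s])]
--         for i in range(n)]
--     opi_result = [
--         [sp for j in range(len(aspect_results[i]))
--          for sp in _spans(opinion_results[i][j])]
--         for i in range(n)]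
--     return total_result, asp_result, opi_result, asp_pol_result, asp_opi_result
-- ===== Notes on version B (the rewrite author's own statement) =====
-- stated objective: alternative
-- what changed: Span extraction is done by a backward dynamic-programming pass building a next-non-2 index table followed by one comprehension (instead of A's nested forward scan with break), and the five outputs are each built by an independent comprehension pass over the per-row span lists (instead of A's single interleaved loop mutating five accumulators).
import Mathlib
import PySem

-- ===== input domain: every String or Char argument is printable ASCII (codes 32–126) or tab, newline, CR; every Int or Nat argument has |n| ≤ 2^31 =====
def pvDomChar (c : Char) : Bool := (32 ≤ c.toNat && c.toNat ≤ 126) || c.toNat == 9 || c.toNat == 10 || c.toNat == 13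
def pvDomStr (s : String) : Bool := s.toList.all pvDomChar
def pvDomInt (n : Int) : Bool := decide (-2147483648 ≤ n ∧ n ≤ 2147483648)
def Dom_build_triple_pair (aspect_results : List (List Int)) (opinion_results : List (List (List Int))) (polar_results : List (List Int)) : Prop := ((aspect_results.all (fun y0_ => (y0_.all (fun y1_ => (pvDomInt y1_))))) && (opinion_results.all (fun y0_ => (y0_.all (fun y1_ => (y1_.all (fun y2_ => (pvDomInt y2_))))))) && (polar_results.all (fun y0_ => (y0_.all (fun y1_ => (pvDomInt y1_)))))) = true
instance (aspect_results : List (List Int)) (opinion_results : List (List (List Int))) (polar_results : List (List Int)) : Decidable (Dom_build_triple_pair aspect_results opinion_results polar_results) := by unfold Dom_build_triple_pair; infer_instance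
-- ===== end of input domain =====

-- B replaces A's nested break-scan span extractor by a backward DP table of next-non-2
-- indices and builds each of the five outputs by its own comprehension pass instead of
-- A's single interleaved five-accumulator loop (alternative decomposition, same results).

-- ===== PORT A =====
-- A's inner 'for k in range(idy+1, len(preds))' loop with its break (indices are Nat and
-- always in range here, so preds[k] is ported as getD; exact where Python returns)
def geb_scan (preds : List Int) (idy : Nat) (k : Nat) : List (List Int) :=
  if _h : k < preds.length then
    if preds.getD k 0 ≠ preds.getD idy 0 + 1 then [[(idy : Int), (k : Int)]]
    else if preds.getD k 0 = preds.getD idy 0 + 1 ∧ k = preds.length - 1 then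
      [[(idy : Int), (k : Int) + 1]]
    else geb_scan preds idy (k + 1)
  else []
termination_by preds.length - k

def get_entity_boundary (preds : List Int) : List (List Int) :=
  (List.range preds.length).foldl
    (fun entityList idy =>
      if preds.getD idy 0 = 1 then
        if idy = preds.length - 1 then entityList ++ [[(idy : Int), (idy : Int) + 1]]
        else entityList ++ geb_scan preds idy (idy + 1)
      else entityList)
    []

-- body of A's 'for asp_start,asp_end in entity_list' loop; state is
-- (cur_instance_result, cur_instance_asp_pol_result, cur_instance_asp_opi_result)
def btA_inner (polarrow : List Int) (opirow : List (List Int))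
    (ir : List (List Int) × List (List Int) × List (List Int)) (sp : List Int) :
    List (List Int) × List (List Int) × List (List Int) :=
  match sp with
  | [asp_start, asp_end] =>
    let polar := polarrow.getD asp_start.toNat 0
    let cap := if polar ≠ 0 then ir.2.1 ++ [[asp_start, asp_end, polar]] else ir.2.1
    let opi_list := get_entity_boundary (opirow.getD asp_start.toNat [])
    let step := opi_list.foldl
      (fun (pr : List (List Int) × List (List Int)) op =>
        match op with
        | [opi_start, opi_end] =>
          (pr.1 ++ [[opi_start, opi_end, asp_start, asp_end]],
           if polar ≠ 0 then pr.2 ++ [[opi_start, opi_end, asp_start, asp_end, polar]] else pr.2)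
        | _ => pr)  -- unreachable: spans always have the form [s, e]
      (ir.2.2, ir.1)
    (step.2, cap, step.1)
  | _ => ir  -- unreachable: spans always have the form [s, e]

-- one iteration of A's 'for idx in range(len(aspect_results))' loop; out-of-range list
-- accesses (Python IndexError) are excluded by Pre_ and ported as getD defaults
def btA_body (aspect_results : List (List Int)) (opinion_results : List (List (List Int))) (polar_results : List (List Int))
    (acc : List (List (List Int)) × List (List (List Int)) × List (List (List Int)) × List (List (List Int)) × List (List (List Int)))
    (idx : Nat) :
    List (List (List Int)) × List (List (List Int)) × List (List (List Int)) × List (List (List Int)) × List (List (List Int)) :=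
  let entity_list := get_entity_boundary (aspect_results.getD idx [])
  let inner := entity_list.foldl
    (btA_inner (polar_results.getD idx []) (opinion_results.getD idx [])) ([], [], [])
  let cur_instance_opi_result := (List.range (aspect_results.getD idx []).length).foldl
    (fun accO idy => accO ++ get_entity_boundary ((opinion_results.getD idx []).getD idy [])) []
  (acc.1 ++ [inner.1], acc.2.1 ++ [entity_list], acc.2.2.1 ++ [cur_instance_opi_result],
   acc.2.2.2.1 ++ [inner.2.1], acc.2.2.2.2 ++ [inner.2.2])

def build_triple_pair (aspect_results : List (List Int)) (opinion_results : List (List (List Int))) (polar_results : List (List Int)) : List (List (List Int)) × List (List (List Int)) × List (List (List Int)) × List (List (List Int)) × List (List (List Int)) :=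
  (List.range aspect_results.length).foldl (btA_body aspect_results opinion_results polar_results)
    ([], [], [], [], [])

-- ===== PORT B =====
-- Source B's backward 'for i in range(n-1,-1,-1)' loop filling nxt; the array built from the
-- right is ported as the natural structural recursion producing the same list of values
-- nxt[k..n] (head = nxt[k]); the getD defaults are never used (the list has length n+1)
def nxtF : List Int → Nat → List Nat
  | [], k => [k]
  | x :: xs, k =>
    let rest := nxtF xs (k + 1)
    (if x = 2 then rest.getD 0 (k + 1) else k) :: rest

-- Source B's '[[i, nxt[i+1]] for i in range(n) if preds[i] == 1]'
def spansB (preds : List Int) : List (List Int) :=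
  let nxt := nxtF preds 0
  (List.range preds.length).flatMap
    (fun i => if preds.getD i 0 = 1 then [[(i : Int), (nxt.getD (i + 1) 0 : Int)]] else [])

-- the asp_pol_result comprehension for one row
def polRowB (prow : List Int) (spans : List (List Int)) : List (List Int) :=
  spans.flatMap (fun sp => match sp with
    | [s, e] => if prow.getD s.toNat 0 ≠ 0 then [[s, e, prow.getD s.toNat 0]] else []
    | _ => [])  -- unreachable: spans always have the form [s, e]

-- the asp_opi_result comprehension for one row
def aoRowB (orow : List (List Int)) (spans : List (List Int)) : List (List Int) :=
  spans.flatMap (fun sp => match sp with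
    | [s, e] => (spansB (orow.getD s.toNat [])).flatMap (fun op => match op with
        | [os, oe] => [[os, oe, s, e]]
        | _ => [])
    | _ => [])  -- unreachable

-- the total_result comprehension for one row
def totRowB (prow : List Int) (orow : List (List Int)) (spans : List (List Int)) : List (List Int) :=
  spans.flatMap (fun sp => match sp with
    | [s, e] => if prow.getD s.toNat 0 ≠ 0 then
        (spansB (orow.getD s.toNat [])).flatMap (fun op => match op with
          | [os, oe] => [[os, oe, s, e, prow.getD s.toNat 0]]
          | _ => [])
      else []
    | _ => [])  -- unreachable

-- the opi_result comprehension for one row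
def opiRowB (arow : List Int) (orow : List (List Int)) : List (List Int) :=
  (List.range arow.length).flatMap (fun j => spansB (orow.getD j []))

def build_triple_pair_alt (aspect_results : List (List Int)) (opinion_results : List (List (List Int))) (polar_results : List (List Int)) : List (List (List Int)) × List (List (List Int)) × List (List (List Int)) × List (List (List Int)) × List (List (List Int)) :=
  let n := aspect_results.length
  let asp_result := aspect_results.map spansB
  let asp_pol_result := (List.range n).map
    (fun i => polRowB (polar_results.getD i []) (asp_result.getD i []))
  let asp_opi_result := (List.range n).map
    (fun i => aoRowB (opinion_results.getD i []) (asp_result.getD i []))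
  let total_result := (List.range n).map
    (fun i => totRowB (polar_results.getD i []) (opinion_results.getD i []) (asp_result.getD i []))
  let opi_result := (List.range n).map
    (fun i => opiRowB (aspect_results.getD i []) (opinion_results.getD i []))
  (total_result, asp_result, opi_result, asp_pol_result, asp_opi_result)

-- ===== PRECONDITION & SPEC =====
-- Pre_ holds exactly where Python A returns: each nonempty aspect row needs an opinion row
-- at least as long, and each position tagged 1 needs a polarity entry (else IndexError).
def Pre_build_triple_pair (aspect_results : List (List Int)) (opinion_results : List (List (List Int))) (polar_results : List (List Int)) : Prop :=
  ∀ i, i < aspect_results.length →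
    ((aspect_results.getD i [] ≠ []) →
      i < opinion_results.length ∧ (aspect_results.getD i []).length ≤ (opinion_results.getD i []).length) ∧
    (∀ j, j < (aspect_results.getD i []).length → (aspect_results.getD i []).getD j 0 = 1 →
      i < polar_results.length ∧ j < (polar_results.getD i []).length)
instance (aspect_results : List (List Int)) (opinion_results : List (List (List Int))) (polar_results : List (List Int)) : Decidable (Pre_build_triple_pair aspect_results opinion_results polar_results) := by unfold Pre_build_triple_pair; infer_instance

def pvWitness_build_triple_pair : List (List Int) × List (List (List Int)) × List (List Int) :=
  ([[1, 2, 0]], [[[1], [0], [1, 2]]], [[2, 0, 0]])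

def Spec_build_triple_pair (aspect_results : List (List Int)) (opinion_results : List (List (List Int))) (polar_results : List (List Int)) (out : List (List (List Int)) × List (List (List Int)) × List (List (List Int)) × List (List (List Int)) × List (List (List Int))) : Prop := out = build_triple_pair_alt aspect_results opinion_results polar_results
instance (aspect_results : List (List Int)) (opinion_results : List (List (List Int))) (polar_results : List (List Int)) (out : List (List (List Int)) × List (List (List Int)) × List (List (List Int)) × List (List (List Int)) × List (List (List Int))) : Decidable (Spec_build_triple_pair aspect_results opinion_results polar_results out) := by
  unfold Spec_build_triple_pair
  -- instance search on the 5-fold product is prohibitively slow here, so the product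
  -- instance is assembled explicitly from the (decidable) component instance
  have d : DecidableEq (List (List (List Int))) := inferInstance
  exact @instDecidableEqProd _ _ d (@instDecidableEqProd _ _ d (@instDecidableEqProd _ _ d (@instDecidableEqProd _ _ d d))) out (build_triple_pair_alt aspect_results opinion_results polar_results)

-- ===== CLAIM (what is proved, stated in full; the proofs are below) =====
def Claim_equal_build_triple_pair : Prop := ∀ (aspect_results : List (List Int)) (opinion_results : List (List (List Int))) (polar_results : List (List Int)), Dom_build_triple_pair aspect_results opinion_results polar_results → Pre_build_triple_pair aspect_results opinion_results polar_results → Spec_build_triple_pair aspect_results opinion_results polar_results (build_triple_pair aspect_results opinion_results polar_results)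

-- ===== LEMMAS AND PROOFS =====

-- proof-only specification device: first index ≥ j whose tag is not 2
def skip2 (preds : List Int) (j : Nat) : Nat :=
  if _h : j < preds.length ∧ preds.getD j 0 = 2 then skip2 preds (j + 1) else j
termination_by preds.length - j

theorem skip2_cons_succ (x : Int) (xs : List Int) (j : Nat) :
    skip2 (x :: xs) (j + 1) = skip2 xs j + 1 := by
  fun_induction skip2 xs j with
  | case1 j h ih =>
    rw [skip2, dif_pos ⟨by simp; omega, by simpa using h.2⟩]
    exact ih
  | case2 j h =>
    rw [skip2, dif_neg]
    intro hc
    exact h ⟨by simpa using hc.1, by simpa using hc.2⟩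

theorem skip2_nil (j : Nat) : skip2 [] j = j := by
  rw [skip2, dif_neg]; simp

theorem nxtF_length (l : List Int) (k : Nat) : (nxtF l k).length = l.length + 1 := by
  induction l generalizing k with
  | nil => simp [nxtF]
  | cons x xs ih => simp [nxtF, ih]

-- the backward DP table holds exactly the skip2 values
theorem nxtF_getD (l : List Int) (k j : Nat) (hj : j ≤ l.length) :
    (nxtF l k).getD j 0 = k + skip2 l j := by
  induction l generalizing k j with
  | nil =>
    simp only [List.length_nil, Nat.le_zero] at hj
    subst hj
    simp [nxtF, skip2_nil]
  | cons x xs ih =>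
    cases j with
    | zero =>
      show ((if x = 2 then (nxtF xs (k + 1)).getD 0 (k + 1) else k) :: nxtF xs (k + 1)).getD 0 0 = _
      by_cases hx : x = 2
      · have hne : 0 < (nxtF xs (k + 1)).length := by rw [nxtF_length]; omega
        rw [List.getD_cons_zero, if_pos hx, List.getD_eq_getElem _ _ hne,
          ← List.getD_eq_getElem (nxtF xs (k + 1)) 0 hne, ih (k + 1) 0 (by omega)]
        have : skip2 (x :: xs) 0 = skip2 xs 0 + 1 := by
          rw [skip2, dif_pos ⟨by simp, by simpa using hx⟩]
          exact skip2_cons_succ x xs 0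
        omega
      · rw [List.getD_cons_zero, if_neg hx]
        have : skip2 (x :: xs) 0 = 0 := by
          rw [skip2, dif_neg]
          intro hc
          exact hx (by simpa using hc.2)
        omega
    | succ j' =>
      show ((if x = 2 then (nxtF xs (k + 1)).getD 0 (k + 1) else k) :: nxtF xs (k + 1)).getD (j' + 1) 0 = _
      rw [List.getD_cons_succ, ih (k + 1) j' (by simpa using hj), skip2_cons_succ]
      omega

-- A's break-scan computes exactly skip2's stopping point
theorem geb_scan_eq (preds : List Int) (idy : Nat) (h1 : preds.getD idy 0 = 1) (k : Nat)
    (hk : k < preds.length) :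
    geb_scan preds idy k = [[(idy : Int), (skip2 preds k : Int)]] := by
  fun_induction geb_scan preds idy k with
  | case1 k hlt hne =>
    rw [skip2, dif_neg]
    intro hc
    exact hne (by rw [hc.2, h1]; norm_num)
  | case2 k hlt hne heq =>
    have h2 : preds.getD k 0 = 2 := by rw [heq.1, h1]; norm_num
    have hend : k + 1 = preds.length := by omega
    rw [skip2, dif_pos ⟨hlt, h2⟩, skip2, dif_neg (fun hc => absurd hc.1 (by omega))]
    norm_num
  | case3 k hlt hne heq ih =>
    have h2 : preds.getD k 0 = 2 := by rw [not_not.mp hne, h1]; norm_num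
    have hkne : k ≠ preds.length - 1 := fun hk' => heq ⟨not_not.mp hne, hk'⟩
    rw [skip2, dif_pos ⟨hlt, h2⟩]
    exact ih (by omega)
  | case4 k hge => omega

-- folding 'acc ++ f x' is init ++ flatMap
theorem foldl_append_flat {α β : Type} (l : List α) (f : α → List β) (init : List β) :
    l.foldl (fun acc x => acc ++ f x) init = init ++ l.flatMap f := by
  induction l generalizing init with
  | nil => simp
  | cons x xs ih => simp [List.foldl_cons, ih]

theorem flatMap_congr_mem {α β : Type} (l : List α) (f g : α → List β)
    (h : ∀ x ∈ l, f x = g x) : l.flatMap f = l.flatMap g := by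
  induction l with
  | nil => rfl
  | cons x xs ih =>
    rw [List.flatMap_cons, List.flatMap_cons, h x (by simp), ih (fun y hy => h y (by simp [hy]))]

-- contribution of one index to A's entity list
def gfun (preds : List Int) (idy : Nat) : List (List Int) :=
  if preds.getD idy 0 = 1 then [[(idy : Int), (skip2 preds (idy + 1) : Int)]] else []

theorem geb_eq_flatMap (preds : List Int) :
    get_entity_boundary preds = (List.range preds.length).flatMap (gfun preds) := by
  unfold get_entity_boundary
  have main : ∀ l : List Nat, (∀ x ∈ l, x < preds.length) → ∀ init : List (List Int),
      l.foldl (fun entityList idy =>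
        if preds.getD idy 0 = 1 then
          if idy = preds.length - 1 then entityList ++ [[(idy : Int), (idy : Int) + 1]]
          else entityList ++ geb_scan preds idy (idy + 1)
        else entityList) init = init ++ l.flatMap (gfun preds) := by
    intro l hl
    induction l with
    | nil => simp
    | cons x xs ih =>
      intro init
      have hx : x < preds.length := hl x (by simp)
      have step : (if preds.getD x 0 = 1 then
          if x = preds.length - 1 then init ++ [[(x : Int), (x : Int) + 1]]
          else init ++ geb_scan preds x (x + 1)
        else init) = init ++ gfun preds x := by
        unfold gfun
        by_cases h1 : preds.getD x 0 = 1
        · rw [if_pos h1, if_pos h1]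
          by_cases hlast : x = preds.length - 1
          · have hxe : x + 1 = preds.length := by omega
            have hs : skip2 preds (x + 1) = x + 1 := by
              rw [skip2, dif_neg (fun hc => absurd hc.1 (by omega))]
            rw [if_pos hlast, hs]
            norm_num
          · rw [if_neg hlast, geb_scan_eq preds x h1 (x + 1) (by omega)]
        · rw [if_neg h1, if_neg h1, List.append_nil]
      rw [List.foldl_cons, step, ih (fun y hy => hl y (by simp [hy])), List.flatMap_cons,
        List.append_assoc]
  rw [main (List.range preds.length) (fun x hx => List.mem_range.mp hx) []]
  simp

-- B's DP-table comprehension equals A's extractor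
theorem spansB_eq (preds : List Int) : spansB preds = get_entity_boundary preds := by
  rw [geb_eq_flatMap]
  unfold spansB
  refine flatMap_congr_mem _ _ _ (fun i hi => ?_)
  have hi' : i < preds.length := List.mem_range.mp hi
  unfold gfun
  rw [nxtF_getD preds 0 (i + 1) (by omega)]
  simp

-- the inner opinion-span foldl of A splits into two comprehensions
theorem opi_foldl (s e polar : Int) (opi_list : List (List Int)) :
    ∀ (c t : List (List Int)),
    opi_list.foldl
      (fun (pr : List (List Int) × List (List Int)) op =>
        match op with
        | [opi_start, opi_end] =>
          (pr.1 ++ [[opi_start, opi_end, s, e]],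
           if polar ≠ 0 then pr.2 ++ [[opi_start, opi_end, s, e, polar]] else pr.2)
        | _ => pr) (c, t) =
      (c ++ opi_list.flatMap (fun op => match op with | [os, oe] => [[os, oe, s, e]] | _ => []),
       t ++ (if polar ≠ 0 then
         opi_list.flatMap (fun op => match op with | [os, oe] => [[os, oe, s, e, polar]] | _ => [])
       else [])) := by
  induction opi_list with
  | nil => intro c t; by_cases hp : polar ≠ 0 <;> simp [hp]
  | cons op rest ih =>
    intro c t
    rcases op with _ | ⟨os, _ | ⟨oe, _ | ⟨z, zs⟩⟩⟩ <;>
      [skip; skip; (· rw [List.foldl_cons]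
                      show rest.foldl _ (c ++ [[os, oe, s, e]], if polar ≠ 0 then t ++ [[os, oe, s, e, polar]] else t) = _
                      rw [ih]
                      by_cases hp : polar ≠ 0 <;> simp [hp]); skip] <;>
      · rw [List.foldl_cons]
        show rest.foldl _ (c, t) = _
        rw [ih]
        by_cases hp : polar ≠ 0 <;> simp [hp]

-- A's per-row span foldl splits into B's three comprehension passes
theorem innerA_eq (prow : List Int) (orow : List (List Int)) (spans : List (List Int)) :
    ∀ (t0 p0 o0 : List (List Int)),
    spans.foldl (btA_inner prow orow) (t0, p0, o0) =
      (t0 ++ totRowB prow orow spans, p0 ++ polRowB prow spans, o0 ++ aoRowB orow spans) := by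
  induction spans with
  | nil => intro t0 p0 o0; simp [totRowB, polRowB, aoRowB]
  | cons sp rest ih =>
    intro t0 p0 o0
    rw [List.foldl_cons]
    rcases sp with _ | ⟨s, _ | ⟨e, _ | ⟨z, zs⟩⟩⟩
    · show rest.foldl _ (t0, p0, o0) = _
      rw [ih]
      simp [totRowB, polRowB, aoRowB]
    · show rest.foldl _ (t0, p0, o0) = _
      rw [ih]
      simp [totRowB, polRowB, aoRowB]
    · show rest.foldl (btA_inner prow orow) (btA_inner prow orow (t0, p0, o0) [s, e]) = _
      have hinner : btA_inner prow orow (t0, p0, o0) [s, e] =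
          (t0 ++ (if prow.getD s.toNat 0 ≠ 0 then
              (get_entity_boundary (orow.getD s.toNat [])).flatMap
                (fun op => match op with | [os, oe] => [[os, oe, s, e, prow.getD s.toNat 0]] | _ => [])
            else []),
           p0 ++ (if prow.getD s.toNat 0 ≠ 0 then [[s, e, prow.getD s.toNat 0]] else []),
           o0 ++ (get_entity_boundary (orow.getD s.toNat [])).flatMap
              (fun op => match op with | [os, oe] => [[os, oe, s, e]] | _ => [])) := by
        simp only [btA_inner]
        rw [opi_foldl s e (prow.getD s.toNat 0) (get_entity_boundary (orow.getD s.toNat [])) o0 t0]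
        split_ifs <;> simp
      rw [hinner, ih]
      simp only [totRowB, polRowB, aoRowB, List.flatMap_cons, spansB_eq, List.append_assoc]
    · show rest.foldl _ (t0, p0, o0) = _
      rw [ih]
      simp [totRowB, polRowB, aoRowB]

-- one iteration of A's outer loop, phrased with B's per-row passes
theorem btA_body_eq (aspect_results : List (List Int)) (opinion_results : List (List (List Int))) (polar_results : List (List Int))
    (acc : List (List (List Int)) × List (List (List Int)) × List (List (List Int)) × List (List (List Int)) × List (List (List Int)))
    (idx : Nat) :
    btA_body aspect_results opinion_results polar_results acc idx =
      (acc.1 ++ [totRowB (polar_results.getD idx []) (opinion_results.getD idx []) (spansB (aspect_results.getD idx []))],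
       acc.2.1 ++ [spansB (aspect_results.getD idx [])],
       acc.2.2.1 ++ [opiRowB (aspect_results.getD idx []) (opinion_results.getD idx [])],
       acc.2.2.2.1 ++ [polRowB (polar_results.getD idx []) (spansB (aspect_results.getD idx []))],
       acc.2.2.2.2 ++ [aoRowB (opinion_results.getD idx []) (spansB (aspect_results.getD idx []))]) := by
  unfold btA_body
  rw [spansB_eq] at *
  simp only [← spansB_eq]
  rw [innerA_eq (polar_results.getD idx []) (opinion_results.getD idx [])
    (spansB (aspect_results.getD idx [])) [] [] []]
  have hopi : (List.range (aspect_results.getD idx []).length).foldl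
      (fun accO idy => accO ++ spansB ((opinion_results.getD idx []).getD idy [])) [] =
      opiRowB (aspect_results.getD idx []) (opinion_results.getD idx []) := by
    rw [foldl_append_flat]
    unfold opiRowB
    simp
  rw [hopi]
  simp

-- a foldl whose body appends one element to each of five accumulators is five maps
theorem foldl5 {X : Type} (F1 F2 F3 F4 F5 : Nat → List X)
    (body : (List (List X) × List (List X) × List (List X) × List (List X) × List (List X)) → Nat →
      (List (List X) × List (List X) × List (List X) × List (List X) × List (List X)))
    (hb : ∀ acc i, body acc i =
      (acc.1 ++ [F1 i], acc.2.1 ++ [F2 i], acc.2.2.1 ++ [F3 i],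
       acc.2.2.2.1 ++ [F4 i], acc.2.2.2.2 ++ [F5 i])) :
    ∀ (l : List Nat) acc, l.foldl body acc =
      (acc.1 ++ l.map F1, acc.2.1 ++ l.map F2, acc.2.2.1 ++ l.map F3,
       acc.2.2.2.1 ++ l.map F4, acc.2.2.2.2 ++ l.map F5) := by
  intro l
  induction l with
  | nil => intro acc; simp
  | cons x xs ih =>
    intro acc
    rw [List.foldl_cons, hb, ih]
    simp

-- mapping over range of getD equals mapping over the list itself
theorem map_getD_range {α β : Type} [Inhabited α] (l : List α) (f : α → β) :
    (List.range l.length).map (fun i => f (l.getD i default)) = l.map f := by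
  apply List.ext_getElem
  · simp
  · intro i h1 h2
    simp only [List.getElem_map, List.getElem_range]
    rw [List.getD_eq_getElem l default (by simpa using h1)]

-- ===== VERDICT (by name: the statement is the Claim_ definition above) =====
theorem build_triple_pair_spec : Claim_equal_build_triple_pair := by
  intro aspect_results opinion_results polar_results _ _
  unfold Spec_build_triple_pair build_triple_pair build_triple_pair_alt
  rw [foldl5
    (fun i => totRowB (polar_results.getD i []) (opinion_results.getD i []) (spansB (aspect_results.getD i [])))
    (fun i => spansB (aspect_results.getD i []))
    (fun i => opiRowB (aspect_results.getD i []) (opinion_results.getD i []))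
    (fun i => polRowB (polar_results.getD i []) (spansB (aspect_results.getD i [])))
    (fun i => aoRowB (opinion_results.getD i []) (spansB (aspect_results.getD i [])))
    (btA_body aspect_results opinion_results polar_results)
    (btA_body_eq aspect_results opinion_results polar_results)
    (List.range aspect_results.length) ([], [], [], [], [])]
  have hasp : ∀ i ∈ List.range aspect_results.length,
      (aspect_results.map spansB).getD i [] = spansB (aspect_results.getD i []) := by
    intro i hi
    have hi' : i < aspect_results.length := List.mem_range.mp hi
    rw [List.getD_eq_getElem _ _ (by simpa using hi'), List.getElem_map,
      List.getD_eq_getElem _ _ hi']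
  have h2 : (List.range aspect_results.length).map (fun i => spansB (aspect_results.getD i [])) =
      aspect_results.map spansB := map_getD_range aspect_results spansB
  refine Prod.ext ?_ (Prod.ext ?_ (Prod.ext ?_ (Prod.ext ?_ ?_))) <;>
    simp only [h2] <;>
    first
      | rfl
      | (refine (List.map_congr_left (fun i hi => ?_)).symm; rw [hasp i hi])
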